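-- pv_equiv track=rewrite | github.com/Doksperiments/aoc_2023 | day_7/main.py | get_sorted_ranking
-- ===== SOURCE A (Python) =====
-- from collections import Counter
--
-- cards_list: list[str] = ['2', '3', '4', '5', '6', '7', '8', '9', 'T', 'J', 'Q', 'K', 'A']
--
-- class CardType:
--     FIVE_KIND = 7
--     FOUR_KIND = 6
--     FULL_HOUSE = 5
--     THREE_KIND = 4
--     TWO_PAIRS = 3
--     ONE_PAIR = 2
--     HIGH_CARD = 1
--
-- def get_type(hand: str) -> int:
--
--     frequency_table: list[tuple[str, int]] = Counter(hand).most_common()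
--
--     match(frequency_table[0][1]):
--         case 5:
--             return CardType.FIVE_KIND
--         case 4:
--             return CardType.FOUR_KIND
--         case 3:
--             if frequency_table[1][1] == 2:
--                 return CardType.FULL_HOUSE
--             else:
--                 return CardType.THREE_KIND
--         case 2:
--             if frequency_table[1][1] == 2:
--                 return CardType.TWO_PAIRS
--             else:
--                 return CardType.ONE_PAIR
--         case 1:
--             return CardType.HIGH_CARD
--         case _:
--             raise ValueError
--
-- def get_type_joker(hand: str) -> int:
--
--     frequency_table: list[tuple[str, int]] = Counter(hand).most_common()
--
--     match(frequency_table[0][1]):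
--         case 5:
--             return CardType.FIVE_KIND
--         case 4:
--             if frequency_table[1][0] == 'J' or frequency_table[0][0] == 'J':
--                 return CardType.FIVE_KIND
--             return CardType.FOUR_KIND
--         case 3:
--             if frequency_table[1][1] == 2:
--                 if frequency_table[1][0] == 'J' or frequency_table[0][0] == 'J':
--                     return CardType.FIVE_KIND
--                 return CardType.FULL_HOUSE
--             elif frequency_table[0][0] == 'J' or frequency_table[1][0] == 'J' or frequency_table[2][0] == 'J':
--                 return CardType.FOUR_KIND
--             else:
--                 return CardType.THREE_KIND
--         case 2:
--             if frequency_table[1][1] == 2: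
--                 if frequency_table[0][0] == 'J' or frequency_table[1][0] == 'J':
--                     return CardType.FOUR_KIND
--                 elif frequency_table[2][0] == 'J':
--                     return CardType.FULL_HOUSE
--                 return CardType.TWO_PAIRS
--             elif frequency_table[0][0] == 'J' or frequency_table[1][0] == 'J' or frequency_table[2][0] == 'J' or frequency_table[3][0] == 'J':
--                 return CardType.THREE_KIND
--             return CardType.ONE_PAIR
--         case 1:
--             if frequency_table[0][0] == 'J' or frequency_table[1][0] == 'J' or frequency_table[2][0] == 'J' or frequency_table[3][0] == 'J' or frequency_table[4][0] == 'J':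
--                 return CardType.ONE_PAIR
--             return CardType.HIGH_CARD
--         case _:
--             raise ValueError
--
-- def get_sorted_ranking(hands: list[str], bids: list[int], joker: bool = False) -> list[list[int]]:
--
--     sorted_lines: list[list[int]] = []
--     card_to_points: dict[str, int] = {card: (i+2) for i, card in enumerate(cards_list)}
--
--     if joker:
--         card_to_points['J'] = 1
--
--     for hand, bid in zip(hands, bids):
--         sorted_lines.append([
--             get_type_joker(hand) if joker else get_type(hand),  # Hand type
--             bid,                                                # Bid amount for hand
--             *[card_to_points[card] for card in hand]            # Cards value in hand
--         ])
--
--     return sorted(sorted_lines, key= lambda line: (line[0], *line[2:]))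
-- ===== SOURCE B (Python) =====
-- from collections import Counter
--
-- cards_list: list[str] = ['2', '3', '4', '5', '6', '7', '8', '9', 'T', 'J', 'Q', 'K', 'A']
--
-- _SIG_TO_TYPE: dict[tuple, int] = {
--     (5,): 7,            # five of a kind
--     (4, 1): 6,          # four of a kind
--     (3, 2): 5,          # full house
--     (3, 1, 1): 4,       # three of a kind
--     (2, 2, 1): 3,       # two pairs
--     (2, 1, 1, 1): 2,    # one pair
--     (1, 1, 1, 1, 1): 1, # high card
-- }
--
-- def _hand_type(hand: str, joker: bool) -> int:
--     counts = Counter(hand)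
--     if joker:
--         j = counts['J']
--         sig = sorted((v for k, v in counts.items() if k != 'J'), reverse=True)
--         if not sig:
--             return 7  # all cards are jokers
--         sig[0] += j
--         return _SIG_TO_TYPE[tuple(sig)]
--     sig = sorted(counts.values(), reverse=True)
--     t = max(min(2 * sig[0] - 2, 7), 1)
--     if sig[0] in (2, 3):
--         t += sig[1] == 2
--     return t
--
-- def get_sorted_ranking(hands: list[str], bids: list[int], joker: bool = False) -> list[list[int]]:
--     points = {card: (i + 2) for i, card in enumerate(cards_list)}
--     if joker:
--         points['J'] = 1
--     lines = [[_hand_type(hand, joker), bid] + [points[card] for card in hand]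
--              for hand, bid in zip(hands, bids)]
--     return sorted(lines, key=lambda line: (line[0], *line[2:]))
-- ===== Notes on version B (the rewrite author's own statement) =====
-- stated objective: simpler
-- what changed: Replaces A's two 20-branch most_common-inspection helpers (get_type/get_type_joker) by one helper on the descending count-signature: a closed-form arithmetic classifier for the plain variant and a fixed 7-entry signature table with the joker count folded into the largest non-joker count for the joker variant; lines are built by a comprehension instead of an append loop.
-- outside the precondition, e.g. on get_sorted_ranking(['J'], [2], True): A returns [[2, 2, 1]], B returns [[7, 2, 1]]; on get_sorted_ranking(['234567'], [1], True): A returns [[1, 1, 2, 3, 4, 5, 6, 7]], B raises KeyError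
import Mathlib
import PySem

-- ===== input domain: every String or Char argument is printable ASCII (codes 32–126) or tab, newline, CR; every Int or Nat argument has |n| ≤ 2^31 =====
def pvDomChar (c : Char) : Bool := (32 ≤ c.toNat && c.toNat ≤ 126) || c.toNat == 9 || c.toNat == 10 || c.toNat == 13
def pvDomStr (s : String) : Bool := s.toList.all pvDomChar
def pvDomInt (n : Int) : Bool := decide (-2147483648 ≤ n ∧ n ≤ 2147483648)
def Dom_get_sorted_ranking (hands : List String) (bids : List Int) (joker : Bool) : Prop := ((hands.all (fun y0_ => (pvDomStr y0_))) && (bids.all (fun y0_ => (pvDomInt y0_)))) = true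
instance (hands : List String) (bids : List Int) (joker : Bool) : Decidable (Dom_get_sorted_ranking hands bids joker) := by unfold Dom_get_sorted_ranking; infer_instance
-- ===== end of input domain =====

-- B replaces A's two 20-branch most_common-inspection helpers by one signature-table classifier
-- (sorted count multiset + joker count folded into the largest non-joker count); objective: simpler.

-- ===== PORT A =====
def pv_cards_list : List Char := ['2','3','4','5','6','7','8','9','T','J','Q','K','A']

-- Counter(hand).most_common() = items of the counter, stably sorted by count descending.
-- 'none' marks exactly where the Python raises (IndexError on frequency_table[i], or the explicit ValueError).
def get_type (hand : String) : Option Int :=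
  let ft := PySem.List.sorted (PySem.Dict.counter hand.toList).items (fun p => p.2) true
  match PySem.List.pyGet? ft 0 with
  | none => none
  | some e0 =>
    if e0.2 = 5 then some 7
    else if e0.2 = 4 then some 6
    else if e0.2 = 3 then
      match PySem.List.pyGet? ft 1 with
      | none => none
      | some e1 => some (if e1.2 = 2 then 5 else 4)
    else if e0.2 = 2 then
      match PySem.List.pyGet? ft 1 with
      | none => none
      | some e1 => some (if e1.2 = 2 then 3 else 2)
    else if e0.2 = 1 then some 1
    else none

def get_type_joker (hand : String) : Option Int :=
  let ft := PySem.List.sorted (PySem.Dict.counter hand.toList).items (fun p => p.2) true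
  match PySem.List.pyGet? ft 0 with
  | none => none
  | some e0 =>
    if e0.2 = 5 then some 7
    else if e0.2 = 4 then
      match PySem.List.pyGet? ft 1 with
      | none => none
      | some e1 => some (if e1.1 = 'J' ∨ e0.1 = 'J' then 7 else 6)
    else if e0.2 = 3 then
      match PySem.List.pyGet? ft 1 with
      | none => none
      | some e1 =>
        if e1.2 = 2 then some (if e1.1 = 'J' ∨ e0.1 = 'J' then 7 else 5)
        else if e0.1 = 'J' ∨ e1.1 = 'J' then some 6
        else match PySem.List.pyGet? ft 2 with
          | none => none
          | some e2 => some (if e2.1 = 'J' then 6 else 4)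
    else if e0.2 = 2 then
      match PySem.List.pyGet? ft 1 with
      | none => none
      | some e1 =>
        if e1.2 = 2 then
          if e0.1 = 'J' ∨ e1.1 = 'J' then some 6
          else match PySem.List.pyGet? ft 2 with
            | none => none
            | some e2 => some (if e2.1 = 'J' then 5 else 3)
        else if e0.1 = 'J' ∨ e1.1 = 'J' then some 4
        else match PySem.List.pyGet? ft 2 with
          | none => none
          | some e2 =>
            if e2.1 = 'J' then some 4
            else match PySem.List.pyGet? ft 3 with
              | none => none
              | some e3 => some (if e3.1 = 'J' then 4 else 2)
    else if e0.2 = 1 then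
      if e0.1 = 'J' then some 2
      else match PySem.List.pyGet? ft 1 with
        | none => none
        | some e1 =>
          if e1.1 = 'J' then some 2
          else match PySem.List.pyGet? ft 2 with
            | none => none
            | some e2 =>
              if e2.1 = 'J' then some 2
              else match PySem.List.pyGet? ft 3 with
                | none => none
                | some e3 =>
                  if e3.1 = 'J' then some 2
                  else match PySem.List.pyGet? ft 4 with
                    | none => none
                    | some e4 => some (if e4.1 = 'J' then 2 else 1)
    else none

def get_sorted_ranking (hands : List String) (bids : List Int) (joker : Bool) : List (List Int) :=
  let card_to_points := (PySem.List.enumerate pv_cards_list).foldl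
    (fun d p => d.insert p.2 (p.1 + 2)) (PySem.Dict.empty : PySem.Dict Char Int)
  let card_to_points := if joker then card_to_points.insert 'J' 1 else card_to_points
  let sorted_lines := (hands.zip bids).foldl
    (fun acc p => acc ++ [[(if joker then get_type_joker p.1 else get_type p.1).getD 0, p.2]
                          ++ p.1.toList.map (fun c => card_to_points.getD c 0)]) []
  PySem.List.sorted sorted_lines
    (fun line => PySem.List.pyGetD line 0 0 :: PySem.List.slice line (some 2) none) false

-- ===== PORT B =====
def pv_cards_list_b : List Char := ['2','3','4','5','6','7','8','9','T','J','Q','K','A']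

def pv_sig_table : List (List Int × Int) :=
  [([5],7),([4,1],6),([3,2],5),([3,1,1],4),([2,2,1],3),([2,1,1,1],2),([1,1,1,1,1],1)]

def pv_hand_type (hand : String) (joker : Bool) : Option Int :=
  let counts := PySem.Dict.counter hand.toList
  if joker then
    let j := counts.getD 'J' 0
    let sig := PySem.List.sorted ((counts.items.filter (fun p => !(p.1 == 'J'))).map (fun p => p.2))
      (fun v => v) true
    match sig with
    | [] => some 7
    | v :: rest => List.lookup ((v + j) :: rest) pv_sig_table
  else
    let sig := PySem.List.sorted counts.values (fun v => v) true
    match PySem.List.pyGet? sig 0 with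
    | none => none
    | some c1 =>
      let t := max (min (2 * c1 - 2) 7) 1
      if c1 = 2 ∨ c1 = 3 then
        match PySem.List.pyGet? sig 1 with
        | none => none
        | some c2 => some (t + if c2 = 2 then 1 else 0)
      else some t

def get_sorted_ranking_alt (hands : List String) (bids : List Int) (joker : Bool) : List (List Int) :=
  let points := (PySem.List.enumerate pv_cards_list_b).foldl
    (fun d p => d.insert p.2 (p.1 + 2)) (PySem.Dict.empty : PySem.Dict Char Int)
  let points := if joker then points.insert 'J' 1 else points
  let lines := (hands.zip bids).map
    (fun p => [(pv_hand_type p.1 joker).getD 0, p.2] ++ p.1.toList.map (fun c => points.getD c 0))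
  PySem.List.sorted lines
    (fun line => PySem.List.pyGetD line 0 0 :: PySem.List.slice line (some 2) none) false

-- ===== PRECONDITION & SPEC =====
-- Pre_ admits, for every processed (zipped) pair: hands of valid card characters only (A raises
-- KeyError otherwise), with joker exactly 5 cards (A's positional joker logic on other lengths is an
-- accidental of most_common order and B's five-card signature table raises KeyError there), and
-- without joker exactly the multiplicity shapes A classifies (nonempty, max multiplicity at most 5,
-- two distinct cards when the max multiplicity is 2 or 3) — elsewhere A raises IndexError/ValueError.
def Pre_get_sorted_ranking (hands : List String) (bids : List Int) (joker : Bool) : Prop :=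
  (hands.zip bids).all (fun p =>
    p.1.toList.all (fun c => pv_cards_list.contains c) &&
    (if joker then p.1.toList.length == 5
     else
       !p.1.toList.isEmpty &&
       p.1.toList.all (fun c => decide (p.1.toList.count c ≤ 5)) &&
       (!(p.1.toList.all (fun c => decide (p.1.toList.count c ≤ 3)) &&
          p.1.toList.any (fun c => decide (2 ≤ p.1.toList.count c))) ||
        p.1.toList.any (fun c => !(c == p.1.toList.headD '2'))))) = true
instance (hands : List String) (bids : List Int) (joker : Bool) : Decidable (Pre_get_sorted_ranking hands bids joker) := by unfold Pre_get_sorted_ranking; infer_instance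

def pvWitness_get_sorted_ranking : List String × List Int × Bool :=
  (["32T3K", "T55J5", "KK677"], [765, 684, 28], true)

def Spec_get_sorted_ranking (hands : List String) (bids : List Int) (joker : Bool) (out : List (List Int)) : Prop := out = get_sorted_ranking_alt hands bids joker
instance (hands : List String) (bids : List Int) (joker : Bool) (out : List (List Int)) : Decidable (Spec_get_sorted_ranking hands bids joker out) := by unfold Spec_get_sorted_ranking; infer_instance

-- ===== CLAIM (what is proved, stated in full; the proofs are below) =====
def Claim_equal_get_sorted_ranking : Prop := ∀ (hands : List String) (bids : List Int) (joker : Bool), Dom_get_sorted_ranking hands bids joker → Pre_get_sorted_ranking hands bids joker → Spec_get_sorted_ranking hands bids joker (get_sorted_ranking hands bids joker)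

-- ===== LEMMAS AND PROOFS =====

-- B's joker classifier as a function of a descending signature + joker count.
def pvBClassify (c : List Int) (j : Int) : Option Int :=
  match c with
  | [] => some 7
  | v :: rest => List.lookup ((v + j) :: rest) pv_sig_table

-- sorted(l, reverse=True) equals any descending rearrangement of l
lemma pv_sorted_desc_eq {l c : List Int} (hp : l.Perm c)
    (hc : c.Pairwise (fun a b : Int => b ≤ a)) :
    PySem.List.sorted l (fun v => v) true = c := by
  refine List.Perm.eq_of_pairwise ?_ (PySem.List.sorted_pairwise_rev l _) hc
    ((PySem.List.sorted_perm l _ true).trans hp)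
  intro a b _ _ h1 h2
  omega

-- a descending list is its own reverse-sort
lemma pv_sorted_self (l : List Int) (hl : l.Pairwise (fun a b : Int => b ≤ a)) :
    PySem.List.sorted l (fun v => v) true = l :=
  pv_sorted_desc_eq (List.Perm.refl l) hl

-- pv_hand_type's joker branch through any descending rearrangement of the filtered count values
lemma pv_hand_type_joker_eq (hand : String) (c : List Int)
    (hperm : (((PySem.Dict.counter hand.toList).items.filter
        (fun p => !(p.1 == 'J'))).map (fun p => p.2)).Perm c)
    (hc : c.Pairwise (fun a b : Int => b ≤ a)) :
    pv_hand_type hand true = pvBClassify c (hand.toList.count 'J' : Int) := by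
  simp only [pv_hand_type, pvBClassify, if_true]
  rw [pv_sorted_desc_eq hperm hc, PySem.Dict.getD_counter]

-- the possible descending count signatures of a 5-card hand
lemma pv_comp5 (vs : List Int) (hp : vs.Pairwise (fun a b : Int => b ≤ a))
    (h1 : ∀ v ∈ vs, 1 ≤ v) (hs : vs.sum = 5) :
    vs = [5] ∨ vs = [4,1] ∨ vs = [3,2] ∨ vs = [3,1,1] ∨ vs = [2,2,1]
      ∨ vs = [2,1,1,1] ∨ vs = [1,1,1,1,1] := by
  rcases vs with _|⟨a, _|⟨b, _|⟨c, _|⟨d, _|⟨e, _|⟨f, rest⟩⟩⟩⟩⟩⟩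
  · simp at hs
  · simp_all
  · simp_all [List.pairwise_cons]; omega
  · simp_all [List.pairwise_cons]; omega
  · simp_all [List.pairwise_cons]; omega
  · simp_all [List.pairwise_cons]; omega
  · have hrest : (0:Int) ≤ rest.sum := by
      apply List.sum_nonneg
      intro v hv
      have := h1 v (by simp [hv])
      omega
    have ha := h1 a (by simp); have hb := h1 b (by simp); have hc := h1 c (by simp)
    have hd := h1 d (by simp); have he := h1 e (by simp); have hf := h1 f (by simp)
    simp only [List.sum_cons] at hs
    simp_all [List.pairwise_cons]
    omega

-- destructuring a pair list from its second components
lemma pv_ms1 {α β : Type} {l : List (α × β)} {v1 : β}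
    (h : l.map (fun p => p.2) = [v1]) : ∃ a, l = [(a,v1)] := by
  rcases l with _|⟨⟨a,x⟩,_|t⟩ <;> simp_all
lemma pv_ms2 {α β : Type} {l : List (α × β)} {v1 v2 : β}
    (h : l.map (fun p => p.2) = [v1,v2]) : ∃ a b, l = [(a,v1),(b,v2)] := by
  rcases l with _|⟨⟨a,x⟩,_|⟨⟨b,y⟩,_|t⟩⟩ <;> simp_all
lemma pv_ms3 {α β : Type} {l : List (α × β)} {v1 v2 v3 : β}
    (h : l.map (fun p => p.2) = [v1,v2,v3]) : ∃ a b c, l = [(a,v1),(b,v2),(c,v3)] := by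
  rcases l with _|⟨⟨a,x⟩,_|⟨⟨b,y⟩,_|⟨⟨c,z⟩,_|t⟩⟩⟩ <;> simp_all
lemma pv_ms4 {α β : Type} {l : List (α × β)} {v1 v2 v3 v4 : β}
    (h : l.map (fun p => p.2) = [v1,v2,v3,v4]) : ∃ a b c d, l = [(a,v1),(b,v2),(c,v3),(d,v4)] := by
  rcases l with _|⟨⟨a,x⟩,_|⟨⟨b,y⟩,_|⟨⟨c,z⟩,_|⟨⟨d,w⟩,_|t⟩⟩⟩⟩ <;> simp_all
lemma pv_ms5 {α β : Type} {l : List (α × β)} {v1 v2 v3 v4 v5 : β}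
    (h : l.map (fun p => p.2) = [v1,v2,v3,v4,v5]) :
    ∃ a b c d e, l = [(a,v1),(b,v2),(c,v3),(d,v4),(e,v5)] := by
  rcases l with _|⟨⟨a,x⟩,_|⟨⟨b,y⟩,_|⟨⟨c,z⟩,_|⟨⟨d,w⟩,_|⟨⟨e,u⟩,_|t⟩⟩⟩⟩⟩ <;> simp_all

-- the central per-hand fact, joker variant (5-card hands)
lemma pv_type_eq_j (hand : String) (h5 : hand.toList.length = 5) :
    get_type_joker hand = pv_hand_type hand true := by
  simp only [get_type_joker]
  set xs := hand.toList with hxs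
  set ft := PySem.List.sorted (PySem.Dict.counter xs).items (fun p => p.2) true with hftdef
  have hpf : ft.Perm (PySem.Dict.counter xs).items := PySem.List.sorted_perm _ _ _
  have hdesc : ft.Pairwise (fun p q => q.2 ≤ p.2) := PySem.List.sorted_pairwise_rev _ _
  have hitems := PySem.Dict.items_counter xs
  have hfst : ((fun p : Char × Int => p.1) ∘ fun k => (k, (xs.count k : Int))) = fun k : Char => k := rfl
  have hsnd : ((fun p : Char × Int => p.2) ∘ fun k => (k, (xs.count k : Int))) = fun k : Char => (xs.count k : Int) := rfl
  have hmem : ∀ p ∈ ft, p.1 ∈ xs ∧ p.2 = (xs.count p.1 : Int) := by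
    intro p hp
    have hm := hpf.mem_iff.mp hp
    rw [hitems] at hm
    rcases List.mem_map.mp hm with ⟨k, hk, rfl⟩
    exact ⟨(PySem.Set.mem_ofList xs k).mp hk, rfl⟩
  have hone : ∀ v ∈ ft.map (fun p => p.2), 1 ≤ v := by
    intro v hv
    rcases List.mem_map.mp hv with ⟨p, hp, rfl⟩
    obtain ⟨h1, h2⟩ := hmem p hp
    have : 0 < xs.count p.1 := List.count_pos_iff.mpr h1
    rw [h2]; exact_mod_cast this
  have hnodup : (ft.map (fun p => p.1)).Nodup := by
    have hperm : (ft.map (fun p => p.1)).Perm ((PySem.Dict.counter xs).items.map (fun p => p.1)) := hpf.map _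
    rw [hitems, List.map_map, hfst] at hperm
    refine hperm.nodup_iff.mpr ?_
    have : (PySem.Set.ofList xs : List Char).map (fun k => k) = (PySem.Set.ofList xs : List Char) := List.map_id' _
    rw [this]
    exact PySem.Set.nodup_ofList xs
  have hJmem : 'J' ∈ xs → ('J', (xs.count 'J' : Int)) ∈ ft := by
    intro h
    apply hpf.mem_iff.mpr
    rw [hitems]
    exact List.mem_map.mpr ⟨'J', (PySem.Set.mem_ofList xs 'J').mpr h, rfl⟩
  have hks : (PySem.Set.ofList xs : List Char).Perm xs.dedup := by
    rw [List.perm_ext_iff_of_nodup (PySem.Set.nodup_ofList xs) (List.nodup_dedup xs)]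
    intro a; rw [PySem.Set.mem_ofList, List.mem_dedup]
  have hsum : (ft.map (fun p => p.2)).sum = 5 := by
    have h1 : (ft.map (fun p => p.2)).Perm ((PySem.Dict.counter xs).items.map (fun p => p.2)) := hpf.map _
    rw [hitems, List.map_map, hsnd] at h1
    rw [h1.sum_eq, (hks.map (fun k => ((xs.count k : Int)))).sum_eq]
    have hcast : (fun k : Char => (xs.count k : Int)) = (Nat.cast : Nat → Int) ∘ (fun k => xs.count k) := rfl
    rw [hcast, ← List.map_map, ← Nat.cast_list_sum, List.sum_map_count_dedup_eq_length, h5]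
    rfl
  have hvsp : (ft.map (fun p => p.2)).Pairwise (fun a b : Int => b ≤ a) := List.pairwise_map.mpr hdesc
  have hB : pv_hand_type hand true
      = pvBClassify (PySem.List.sorted ((ft.filter (fun p => !(p.1 == 'J'))).map (fun p => p.2)) (fun v => v) true)
          ((xs.count 'J' : Int)) := by
    refine pv_hand_type_joker_eq hand _ ?_ (PySem.List.sorted_pairwise_rev _ _)
    exact ((hpf.symm.filter _).map _).trans (PySem.List.sorted_perm _ _ _).symm
  have hcomp := pv_comp5 (ft.map (fun p => p.2)) hvsp hone hsum
  clear_value ft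
  clear hftdef hdesc hpf hitems hks hvsp hone hsum hfst hsnd
  rw [hB]
  by_cases hJx : 'J' ∈ xs
  case neg =>
    have hcnt : xs.count 'J' = 0 := List.count_eq_zero.mpr hJx
    rcases hcomp with h|h|h|h|h|h|h
    · obtain ⟨a, rfl⟩ := pv_ms1 h
      have ha : a ≠ 'J' := fun hEq => hJx (hEq ▸ (hmem (a,5) (by simp)).1)
      have ha' : (a == 'J') = false := beq_eq_false_iff_ne.mpr ha
      simp only [hcnt, List.filter, ha', Bool.not_false,
        List.map_cons, List.map_nil, Nat.cast_zero]
      rw [pv_sorted_self _ (by decide)]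
      simp [PySem.List.pyGet?, PySem.List.pyIdx?, ha, pvBClassify, pv_sig_table, List.lookup]
    · obtain ⟨a, b, rfl⟩ := pv_ms2 h
      have ha : a ≠ 'J' := fun hEq => hJx (hEq ▸ (hmem (a,4) (by simp)).1)
      have ha' : (a == 'J') = false := beq_eq_false_iff_ne.mpr ha
      have hb : b ≠ 'J' := fun hEq => hJx (hEq ▸ (hmem (b,1) (by simp)).1)
      have hb' : (b == 'J') = false := beq_eq_false_iff_ne.mpr hb
      simp only [hcnt, List.filter, ha', hb', Bool.not_false,
        List.map_cons, List.map_nil, Nat.cast_zero]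
      rw [pv_sorted_self _ (by decide)]
      simp [PySem.List.pyGet?, PySem.List.pyIdx?, ha, hb, pvBClassify, pv_sig_table, List.lookup]
    · obtain ⟨a, b, rfl⟩ := pv_ms2 h
      have ha : a ≠ 'J' := fun hEq => hJx (hEq ▸ (hmem (a,3) (by simp)).1)
      have ha' : (a == 'J') = false := beq_eq_false_iff_ne.mpr ha
      have hb : b ≠ 'J' := fun hEq => hJx (hEq ▸ (hmem (b,2) (by simp)).1)
      have hb' : (b == 'J') = false := beq_eq_false_iff_ne.mpr hb
      simp only [hcnt, List.filter, ha', hb', Bool.not_false,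
        List.map_cons, List.map_nil, Nat.cast_zero]
      rw [pv_sorted_self _ (by decide)]
      simp [PySem.List.pyGet?, PySem.List.pyIdx?, ha, hb, pvBClassify, pv_sig_table, List.lookup]
    · obtain ⟨a, b, c, rfl⟩ := pv_ms3 h
      have ha : a ≠ 'J' := fun hEq => hJx (hEq ▸ (hmem (a,3) (by simp)).1)
      have ha' : (a == 'J') = false := beq_eq_false_iff_ne.mpr ha
      have hb : b ≠ 'J' := fun hEq => hJx (hEq ▸ (hmem (b,1) (by simp)).1)
      have hb' : (b == 'J') = false := beq_eq_false_iff_ne.mpr hb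
      have hc : c ≠ 'J' := fun hEq => hJx (hEq ▸ (hmem (c,1) (by simp)).1)
      have hc' : (c == 'J') = false := beq_eq_false_iff_ne.mpr hc
      simp only [hcnt, List.filter, ha', hb', hc', Bool.not_false,
        List.map_cons, List.map_nil, Nat.cast_zero]
      rw [pv_sorted_self _ (by decide)]
      simp [PySem.List.pyGet?, PySem.List.pyIdx?, ha, hb, hc, pvBClassify, pv_sig_table, List.lookup]
    · obtain ⟨a, b, c, rfl⟩ := pv_ms3 h
      have ha : a ≠ 'J' := fun hEq => hJx (hEq ▸ (hmem (a,2) (by simp)).1)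
      have ha' : (a == 'J') = false := beq_eq_false_iff_ne.mpr ha
      have hb : b ≠ 'J' := fun hEq => hJx (hEq ▸ (hmem (b,2) (by simp)).1)
      have hb' : (b == 'J') = false := beq_eq_false_iff_ne.mpr hb
      have hc : c ≠ 'J' := fun hEq => hJx (hEq ▸ (hmem (c,1) (by simp)).1)
      have hc' : (c == 'J') = false := beq_eq_false_iff_ne.mpr hc
      simp only [hcnt, List.filter, ha', hb', hc', Bool.not_false,
        List.map_cons, List.map_nil, Nat.cast_zero]
      rw [pv_sorted_self _ (by decide)]
      simp [PySem.List.pyGet?, PySem.List.pyIdx?, ha, hb, hc, pvBClassify, pv_sig_table, List.lookup]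
    · obtain ⟨a, b, c, d, rfl⟩ := pv_ms4 h
      have ha : a ≠ 'J' := fun hEq => hJx (hEq ▸ (hmem (a,2) (by simp)).1)
      have ha' : (a == 'J') = false := beq_eq_false_iff_ne.mpr ha
      have hb : b ≠ 'J' := fun hEq => hJx (hEq ▸ (hmem (b,1) (by simp)).1)
      have hb' : (b == 'J') = false := beq_eq_false_iff_ne.mpr hb
      have hc : c ≠ 'J' := fun hEq => hJx (hEq ▸ (hmem (c,1) (by simp)).1)
      have hc' : (c == 'J') = false := beq_eq_false_iff_ne.mpr hc
      have hd : d ≠ 'J' := fun hEq => hJx (hEq ▸ (hmem (d,1) (by simp)).1)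
      have hd' : (d == 'J') = false := beq_eq_false_iff_ne.mpr hd
      simp only [hcnt, List.filter, ha', hb', hc', hd', Bool.not_false,
        List.map_cons, List.map_nil, Nat.cast_zero]
      rw [pv_sorted_self _ (by decide)]
      simp [PySem.List.pyGet?, PySem.List.pyIdx?, ha, hb, hc, hd, pvBClassify, pv_sig_table, List.lookup]
    · obtain ⟨a, b, c, d, e, rfl⟩ := pv_ms5 h
      have ha : a ≠ 'J' := fun hEq => hJx (hEq ▸ (hmem (a,1) (by simp)).1)
      have ha' : (a == 'J') = false := beq_eq_false_iff_ne.mpr ha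
      have hb : b ≠ 'J' := fun hEq => hJx (hEq ▸ (hmem (b,1) (by simp)).1)
      have hb' : (b == 'J') = false := beq_eq_false_iff_ne.mpr hb
      have hc : c ≠ 'J' := fun hEq => hJx (hEq ▸ (hmem (c,1) (by simp)).1)
      have hc' : (c == 'J') = false := beq_eq_false_iff_ne.mpr hc
      have hd : d ≠ 'J' := fun hEq => hJx (hEq ▸ (hmem (d,1) (by simp)).1)
      have hd' : (d == 'J') = false := beq_eq_false_iff_ne.mpr hd
      have he : e ≠ 'J' := fun hEq => hJx (hEq ▸ (hmem (e,1) (by simp)).1)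
      have he' : (e == 'J') = false := beq_eq_false_iff_ne.mpr he
      simp only [hcnt, List.filter, ha', hb', hc', hd', he', Bool.not_false,
        List.map_cons, List.map_nil, Nat.cast_zero]
      rw [pv_sorted_self _ (by decide)]
      simp [PySem.List.pyGet?, PySem.List.pyIdx?, ha, hb, hc, hd, he, pvBClassify, pv_sig_table, List.lookup]
  case pos =>
    have hin := hJmem hJx
    rcases hcomp with h|h|h|h|h|h|h
    · obtain ⟨a, rfl⟩ := pv_ms1 h
      simp only [List.mem_cons, List.not_mem_nil, or_false] at hin
      have heq := hin
      injection heq with h1 h2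
      subst h1
      have hcnt : xs.count 'J' = 5 := by exact_mod_cast h2
      simp only [hcnt, List.filter, beq_self_eq_true,
        Bool.not_true, Bool.not_false, List.map_cons, List.map_nil]
      rw [pv_sorted_self _ (by decide)]
      simp [PySem.List.pyGet?, PySem.List.pyIdx?, pvBClassify, pv_sig_table, List.lookup]
    · obtain ⟨a, b, rfl⟩ := pv_ms2 h
      simp only [List.mem_cons, List.not_mem_nil, or_false] at hin
      rcases hin with heq|heq
      · injection heq with h1 h2
        subst h1
        have hcnt : xs.count 'J' = 4 := by exact_mod_cast h2
        have hnd := hnodup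
        simp only [List.map_cons, List.map_nil] at hnd
        have hb : b ≠ 'J' := by intro hEq; subst hEq; simp at hnd
        have hb' : (b == 'J') = false := beq_eq_false_iff_ne.mpr hb
        simp only [hcnt, List.filter, beq_self_eq_true, hb',
          Bool.not_true, Bool.not_false, List.map_cons, List.map_nil]
        rw [pv_sorted_self _ (by decide)]
        simp [PySem.List.pyGet?, PySem.List.pyIdx?, hb, pvBClassify, pv_sig_table, List.lookup]
      · injection heq with h1 h2
        subst h1
        have hcnt : xs.count 'J' = 1 := by exact_mod_cast h2
        have hnd := hnodup
        simp only [List.map_cons, List.map_nil] at hnd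
        have ha : a ≠ 'J' := by intro hEq; subst hEq; simp at hnd
        have ha' : (a == 'J') = false := beq_eq_false_iff_ne.mpr ha
        simp only [hcnt, List.filter, beq_self_eq_true, ha',
          Bool.not_true, Bool.not_false, List.map_cons, List.map_nil]
        rw [pv_sorted_self _ (by decide)]
        simp [PySem.List.pyGet?, PySem.List.pyIdx?, ha, pvBClassify, pv_sig_table, List.lookup]
    · obtain ⟨a, b, rfl⟩ := pv_ms2 h
      simp only [List.mem_cons, List.not_mem_nil, or_false] at hin
      rcases hin with heq|heq
      · injection heq with h1 h2
        subst h1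
        have hcnt : xs.count 'J' = 3 := by exact_mod_cast h2
        have hnd := hnodup
        simp only [List.map_cons, List.map_nil] at hnd
        have hb : b ≠ 'J' := by intro hEq; subst hEq; simp at hnd
        have hb' : (b == 'J') = false := beq_eq_false_iff_ne.mpr hb
        simp only [hcnt, List.filter, beq_self_eq_true, hb',
          Bool.not_true, Bool.not_false, List.map_cons, List.map_nil]
        rw [pv_sorted_self _ (by decide)]
        simp [PySem.List.pyGet?, PySem.List.pyIdx?, hb, pvBClassify, pv_sig_table, List.lookup]
      · injection heq with h1 h2
        subst h1
        have hcnt : xs.count 'J' = 2 := by exact_mod_cast h2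
        have hnd := hnodup
        simp only [List.map_cons, List.map_nil] at hnd
        have ha : a ≠ 'J' := by intro hEq; subst hEq; simp at hnd
        have ha' : (a == 'J') = false := beq_eq_false_iff_ne.mpr ha
        simp only [hcnt, List.filter, beq_self_eq_true, ha',
          Bool.not_true, Bool.not_false, List.map_cons, List.map_nil]
        rw [pv_sorted_self _ (by decide)]
        simp [PySem.List.pyGet?, PySem.List.pyIdx?, ha, pvBClassify, pv_sig_table, List.lookup]
    · obtain ⟨a, b, c, rfl⟩ := pv_ms3 h
      simp only [List.mem_cons, List.not_mem_nil, or_false] at hin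
      rcases hin with heq|heq|heq
      · injection heq with h1 h2
        subst h1
        have hcnt : xs.count 'J' = 3 := by exact_mod_cast h2
        have hnd := hnodup
        simp only [List.map_cons, List.map_nil] at hnd
        have hb : b ≠ 'J' := by intro hEq; subst hEq; simp at hnd
        have hb' : (b == 'J') = false := beq_eq_false_iff_ne.mpr hb
        have hc : c ≠ 'J' := by intro hEq; subst hEq; simp at hnd
        have hc' : (c == 'J') = false := beq_eq_false_iff_ne.mpr hc
        simp only [hcnt, List.filter, beq_self_eq_true, hb', hc',
          Bool.not_true, Bool.not_false, List.map_cons, List.map_nil]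
        rw [pv_sorted_self _ (by decide)]
        simp [PySem.List.pyGet?, PySem.List.pyIdx?, hb, hc, pvBClassify, pv_sig_table, List.lookup]
      · injection heq with h1 h2
        subst h1
        have hcnt : xs.count 'J' = 1 := by exact_mod_cast h2
        have hnd := hnodup
        simp only [List.map_cons, List.map_nil] at hnd
        have ha : a ≠ 'J' := by intro hEq; subst hEq; simp at hnd
        have ha' : (a == 'J') = false := beq_eq_false_iff_ne.mpr ha
        have hc : c ≠ 'J' := by intro hEq; subst hEq; simp at hnd
        have hc' : (c == 'J') = false := beq_eq_false_iff_ne.mpr hc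
        simp only [hcnt, List.filter, beq_self_eq_true, ha', hc',
          Bool.not_true, Bool.not_false, List.map_cons, List.map_nil]
        rw [pv_sorted_self _ (by decide)]
        simp [PySem.List.pyGet?, PySem.List.pyIdx?, ha, hc, pvBClassify, pv_sig_table, List.lookup]
      · injection heq with h1 h2
        subst h1
        have hcnt : xs.count 'J' = 1 := by exact_mod_cast h2
        have hnd := hnodup
        simp only [List.map_cons, List.map_nil] at hnd
        have ha : a ≠ 'J' := by intro hEq; subst hEq; simp at hnd
        have ha' : (a == 'J') = false := beq_eq_false_iff_ne.mpr ha
        have hb : b ≠ 'J' := by intro hEq; subst hEq; simp at hnd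
        have hb' : (b == 'J') = false := beq_eq_false_iff_ne.mpr hb
        simp only [hcnt, List.filter, beq_self_eq_true, ha', hb',
          Bool.not_true, Bool.not_false, List.map_cons, List.map_nil]
        rw [pv_sorted_self _ (by decide)]
        simp [PySem.List.pyGet?, PySem.List.pyIdx?, ha, hb, pvBClassify, pv_sig_table, List.lookup]
    · obtain ⟨a, b, c, rfl⟩ := pv_ms3 h
      simp only [List.mem_cons, List.not_mem_nil, or_false] at hin
      rcases hin with heq|heq|heq
      · injection heq with h1 h2
        subst h1
        have hcnt : xs.count 'J' = 2 := by exact_mod_cast h2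
        have hnd := hnodup
        simp only [List.map_cons, List.map_nil] at hnd
        have hb : b ≠ 'J' := by intro hEq; subst hEq; simp at hnd
        have hb' : (b == 'J') = false := beq_eq_false_iff_ne.mpr hb
        have hc : c ≠ 'J' := by intro hEq; subst hEq; simp at hnd
        have hc' : (c == 'J') = false := beq_eq_false_iff_ne.mpr hc
        simp only [hcnt, List.filter, beq_self_eq_true, hb', hc',
          Bool.not_true, Bool.not_false, List.map_cons, List.map_nil]
        rw [pv_sorted_self _ (by decide)]
        simp [PySem.List.pyGet?, PySem.List.pyIdx?, hb, hc, pvBClassify, pv_sig_table, List.lookup]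
      · injection heq with h1 h2
        subst h1
        have hcnt : xs.count 'J' = 2 := by exact_mod_cast h2
        have hnd := hnodup
        simp only [List.map_cons, List.map_nil] at hnd
        have ha : a ≠ 'J' := by intro hEq; subst hEq; simp at hnd
        have ha' : (a == 'J') = false := beq_eq_false_iff_ne.mpr ha
        have hc : c ≠ 'J' := by intro hEq; subst hEq; simp at hnd
        have hc' : (c == 'J') = false := beq_eq_false_iff_ne.mpr hc
        simp only [hcnt, List.filter, beq_self_eq_true, ha', hc',
          Bool.not_true, Bool.not_false, List.map_cons, List.map_nil]
        rw [pv_sorted_self _ (by decide)]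
        simp [PySem.List.pyGet?, PySem.List.pyIdx?, ha, hc, pvBClassify, pv_sig_table, List.lookup]
      · injection heq with h1 h2
        subst h1
        have hcnt : xs.count 'J' = 1 := by exact_mod_cast h2
        have hnd := hnodup
        simp only [List.map_cons, List.map_nil] at hnd
        have ha : a ≠ 'J' := by intro hEq; subst hEq; simp at hnd
        have ha' : (a == 'J') = false := beq_eq_false_iff_ne.mpr ha
        have hb : b ≠ 'J' := by intro hEq; subst hEq; simp at hnd
        have hb' : (b == 'J') = false := beq_eq_false_iff_ne.mpr hb
        simp only [hcnt, List.filter, beq_self_eq_true, ha', hb',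
          Bool.not_true, Bool.not_false, List.map_cons, List.map_nil]
        rw [pv_sorted_self _ (by decide)]
        simp [PySem.List.pyGet?, PySem.List.pyIdx?, ha, hb, pvBClassify, pv_sig_table, List.lookup]
    · obtain ⟨a, b, c, d, rfl⟩ := pv_ms4 h
      simp only [List.mem_cons, List.not_mem_nil, or_false] at hin
      rcases hin with heq|heq|heq|heq
      · injection heq with h1 h2
        subst h1
        have hcnt : xs.count 'J' = 2 := by exact_mod_cast h2
        have hnd := hnodup
        simp only [List.map_cons, List.map_nil] at hnd
        have hb : b ≠ 'J' := by intro hEq; subst hEq; simp at hnd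
        have hb' : (b == 'J') = false := beq_eq_false_iff_ne.mpr hb
        have hc : c ≠ 'J' := by intro hEq; subst hEq; simp at hnd
        have hc' : (c == 'J') = false := beq_eq_false_iff_ne.mpr hc
        have hd : d ≠ 'J' := by intro hEq; subst hEq; simp at hnd
        have hd' : (d == 'J') = false := beq_eq_false_iff_ne.mpr hd
        simp only [hcnt, List.filter, beq_self_eq_true, hb', hc', hd',
          Bool.not_true, Bool.not_false, List.map_cons, List.map_nil]
        rw [pv_sorted_self _ (by decide)]
        simp [PySem.List.pyGet?, PySem.List.pyIdx?, hb, hc, hd, pvBClassify, pv_sig_table, List.lookup]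
      · injection heq with h1 h2
        subst h1
        have hcnt : xs.count 'J' = 1 := by exact_mod_cast h2
        have hnd := hnodup
        simp only [List.map_cons, List.map_nil] at hnd
        have ha : a ≠ 'J' := by intro hEq; subst hEq; simp at hnd
        have ha' : (a == 'J') = false := beq_eq_false_iff_ne.mpr ha
        have hc : c ≠ 'J' := by intro hEq; subst hEq; simp at hnd
        have hc' : (c == 'J') = false := beq_eq_false_iff_ne.mpr hc
        have hd : d ≠ 'J' := by intro hEq; subst hEq; simp at hnd
        have hd' : (d == 'J') = false := beq_eq_false_iff_ne.mpr hd
        simp only [hcnt, List.filter, beq_self_eq_true, ha', hc', hd',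
          Bool.not_true, Bool.not_false, List.map_cons, List.map_nil]
        rw [pv_sorted_self _ (by decide)]
        simp [PySem.List.pyGet?, PySem.List.pyIdx?, ha, hc, hd, pvBClassify, pv_sig_table, List.lookup]
      · injection heq with h1 h2
        subst h1
        have hcnt : xs.count 'J' = 1 := by exact_mod_cast h2
        have hnd := hnodup
        simp only [List.map_cons, List.map_nil] at hnd
        have ha : a ≠ 'J' := by intro hEq; subst hEq; simp at hnd
        have ha' : (a == 'J') = false := beq_eq_false_iff_ne.mpr ha
        have hb : b ≠ 'J' := by intro hEq; subst hEq; simp at hnd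
        have hb' : (b == 'J') = false := beq_eq_false_iff_ne.mpr hb
        have hd : d ≠ 'J' := by intro hEq; subst hEq; simp at hnd
        have hd' : (d == 'J') = false := beq_eq_false_iff_ne.mpr hd
        simp only [hcnt, List.filter, beq_self_eq_true, ha', hb', hd',
          Bool.not_true, Bool.not_false, List.map_cons, List.map_nil]
        rw [pv_sorted_self _ (by decide)]
        simp [PySem.List.pyGet?, PySem.List.pyIdx?, ha, hb, hd, pvBClassify, pv_sig_table, List.lookup]
      · injection heq with h1 h2
        subst h1
        have hcnt : xs.count 'J' = 1 := by exact_mod_cast h2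
        have hnd := hnodup
        simp only [List.map_cons, List.map_nil] at hnd
        have ha : a ≠ 'J' := by intro hEq; subst hEq; simp at hnd
        have ha' : (a == 'J') = false := beq_eq_false_iff_ne.mpr ha
        have hb : b ≠ 'J' := by intro hEq; subst hEq; simp at hnd
        have hb' : (b == 'J') = false := beq_eq_false_iff_ne.mpr hb
        have hc : c ≠ 'J' := by intro hEq; subst hEq; simp at hnd
        have hc' : (c == 'J') = false := beq_eq_false_iff_ne.mpr hc
        simp only [hcnt, List.filter, beq_self_eq_true, ha', hb', hc',
          Bool.not_true, Bool.not_false, List.map_cons, List.map_nil]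
        rw [pv_sorted_self _ (by decide)]
        simp [PySem.List.pyGet?, PySem.List.pyIdx?, ha, hb, hc, pvBClassify, pv_sig_table, List.lookup]
    · obtain ⟨a, b, c, d, e, rfl⟩ := pv_ms5 h
      simp only [List.mem_cons, List.not_mem_nil, or_false] at hin
      rcases hin with heq|heq|heq|heq|heq
      · injection heq with h1 h2
        subst h1
        have hcnt : xs.count 'J' = 1 := by exact_mod_cast h2
        have hnd := hnodup
        simp only [List.map_cons, List.map_nil] at hnd
        have hb : b ≠ 'J' := by intro hEq; subst hEq; simp at hnd
        have hb' : (b == 'J') = false := beq_eq_false_iff_ne.mpr hb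
        have hc : c ≠ 'J' := by intro hEq; subst hEq; simp at hnd
        have hc' : (c == 'J') = false := beq_eq_false_iff_ne.mpr hc
        have hd : d ≠ 'J' := by intro hEq; subst hEq; simp at hnd
        have hd' : (d == 'J') = false := beq_eq_false_iff_ne.mpr hd
        have he : e ≠ 'J' := by intro hEq; subst hEq; simp at hnd
        have he' : (e == 'J') = false := beq_eq_false_iff_ne.mpr he
        simp only [hcnt, List.filter, beq_self_eq_true, hb', hc', hd', he',
          Bool.not_true, Bool.not_false, List.map_cons, List.map_nil]
        rw [pv_sorted_self _ (by decide)]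
        simp [PySem.List.pyGet?, PySem.List.pyIdx?, hb, hc, hd, he, pvBClassify, pv_sig_table, List.lookup]
      · injection heq with h1 h2
        subst h1
        have hcnt : xs.count 'J' = 1 := by exact_mod_cast h2
        have hnd := hnodup
        simp only [List.map_cons, List.map_nil] at hnd
        have ha : a ≠ 'J' := by intro hEq; subst hEq; simp at hnd
        have ha' : (a == 'J') = false := beq_eq_false_iff_ne.mpr ha
        have hc : c ≠ 'J' := by intro hEq; subst hEq; simp at hnd
        have hc' : (c == 'J') = false := beq_eq_false_iff_ne.mpr hc
        have hd : d ≠ 'J' := by intro hEq; subst hEq; simp at hnd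
        have hd' : (d == 'J') = false := beq_eq_false_iff_ne.mpr hd
        have he : e ≠ 'J' := by intro hEq; subst hEq; simp at hnd
        have he' : (e == 'J') = false := beq_eq_false_iff_ne.mpr he
        simp only [hcnt, List.filter, beq_self_eq_true, ha', hc', hd', he',
          Bool.not_true, Bool.not_false, List.map_cons, List.map_nil]
        rw [pv_sorted_self _ (by decide)]
        simp [PySem.List.pyGet?, PySem.List.pyIdx?, ha, hc, hd, he, pvBClassify, pv_sig_table, List.lookup]
      · injection heq with h1 h2
        subst h1
        have hcnt : xs.count 'J' = 1 := by exact_mod_cast h2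
        have hnd := hnodup
        simp only [List.map_cons, List.map_nil] at hnd
        have ha : a ≠ 'J' := by intro hEq; subst hEq; simp at hnd
        have ha' : (a == 'J') = false := beq_eq_false_iff_ne.mpr ha
        have hb : b ≠ 'J' := by intro hEq; subst hEq; simp at hnd
        have hb' : (b == 'J') = false := beq_eq_false_iff_ne.mpr hb
        have hd : d ≠ 'J' := by intro hEq; subst hEq; simp at hnd
        have hd' : (d == 'J') = false := beq_eq_false_iff_ne.mpr hd
        have he : e ≠ 'J' := by intro hEq; subst hEq; simp at hnd
        have he' : (e == 'J') = false := beq_eq_false_iff_ne.mpr he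
        simp only [hcnt, List.filter, beq_self_eq_true, ha', hb', hd', he',
          Bool.not_true, Bool.not_false, List.map_cons, List.map_nil]
        rw [pv_sorted_self _ (by decide)]
        simp [PySem.List.pyGet?, PySem.List.pyIdx?, ha, hb, hd, he, pvBClassify, pv_sig_table, List.lookup]
      · injection heq with h1 h2
        subst h1
        have hcnt : xs.count 'J' = 1 := by exact_mod_cast h2
        have hnd := hnodup
        simp only [List.map_cons, List.map_nil] at hnd
        have ha : a ≠ 'J' := by intro hEq; subst hEq; simp at hnd
        have ha' : (a == 'J') = false := beq_eq_false_iff_ne.mpr ha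
        have hb : b ≠ 'J' := by intro hEq; subst hEq; simp at hnd
        have hb' : (b == 'J') = false := beq_eq_false_iff_ne.mpr hb
        have hc : c ≠ 'J' := by intro hEq; subst hEq; simp at hnd
        have hc' : (c == 'J') = false := beq_eq_false_iff_ne.mpr hc
        have he : e ≠ 'J' := by intro hEq; subst hEq; simp at hnd
        have he' : (e == 'J') = false := beq_eq_false_iff_ne.mpr he
        simp only [hcnt, List.filter, beq_self_eq_true, ha', hb', hc', he',
          Bool.not_true, Bool.not_false, List.map_cons, List.map_nil]
        rw [pv_sorted_self _ (by decide)]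
        simp [PySem.List.pyGet?, PySem.List.pyIdx?, ha, hb, hc, he, pvBClassify, pv_sig_table, List.lookup]
      · injection heq with h1 h2
        subst h1
        have hcnt : xs.count 'J' = 1 := by exact_mod_cast h2
        have hnd := hnodup
        simp only [List.map_cons, List.map_nil] at hnd
        have ha : a ≠ 'J' := by intro hEq; subst hEq; simp at hnd
        have ha' : (a == 'J') = false := beq_eq_false_iff_ne.mpr ha
        have hb : b ≠ 'J' := by intro hEq; subst hEq; simp at hnd
        have hb' : (b == 'J') = false := beq_eq_false_iff_ne.mpr hb
        have hc : c ≠ 'J' := by intro hEq; subst hEq; simp at hnd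
        have hc' : (c == 'J') = false := beq_eq_false_iff_ne.mpr hc
        have hd : d ≠ 'J' := by intro hEq; subst hEq; simp at hnd
        have hd' : (d == 'J') = false := beq_eq_false_iff_ne.mpr hd
        simp only [hcnt, List.filter, beq_self_eq_true, ha', hb', hc', hd',
          Bool.not_true, Bool.not_false, List.map_cons, List.map_nil]
        rw [pv_sorted_self _ (by decide)]
        simp [PySem.List.pyGet?, PySem.List.pyIdx?, ha, hb, hc, hd, pvBClassify, pv_sig_table, List.lookup]

-- index bound discharged when unfolding pyGet? on cons lists
lemma pv_len_succ_nonneg (n : Nat) : (0:Int) ≤ (n:Int) + 1 := by positivity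

-- the central per-hand fact, plain variant (any hand shape A classifies)
lemma pv_type_eq_p (hand : String)
    (hne : hand.toList ≠ [])
    (hle5 : ∀ c ∈ hand.toList, hand.toList.count c ≤ 5)
    (hsh : ((∃ c ∈ hand.toList, 3 < hand.toList.count c) ∨ ∀ c ∈ hand.toList, hand.toList.count c ≤ 1)
            ∨ ∃ c ∈ hand.toList, ¬c = hand.toList.head?.getD '2') :
    get_type hand = pv_hand_type hand false := by
  simp only [get_type, pv_hand_type, Bool.false_eq_true, if_false]
  set xs := hand.toList with hxs
  set ft := PySem.List.sorted (PySem.Dict.counter xs).items (fun p => p.2) true with hftdef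
  have hpf : ft.Perm (PySem.Dict.counter xs).items := PySem.List.sorted_perm _ _ _
  have hdesc : ft.Pairwise (fun p q => q.2 ≤ p.2) := PySem.List.sorted_pairwise_rev _ _
  have hitems := PySem.Dict.items_counter xs
  have hmem : ∀ p ∈ ft, p.1 ∈ xs ∧ p.2 = (xs.count p.1 : Int) := by
    intro p hp
    have hm := hpf.mem_iff.mp hp
    rw [hitems] at hm
    rcases List.mem_map.mp hm with ⟨k, hk, rfl⟩
    exact ⟨(PySem.Set.mem_ofList xs k).mp hk, rfl⟩
  have hone : ∀ v ∈ ft.map (fun p => p.2), 1 ≤ v := by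
    intro v hv
    rcases List.mem_map.mp hv with ⟨p, hp, rfl⟩
    obtain ⟨h1, h2⟩ := hmem p hp
    have : 0 < xs.count p.1 := List.count_pos_iff.mpr h1
    rw [h2]; exact_mod_cast this
  have hsig : PySem.List.sorted (PySem.Dict.counter xs).values (fun v => v) true = ft.map (fun p => p.2) := by
    apply pv_sorted_desc_eq
    · exact (hpf.map (fun p => p.2)).symm
    · exact List.pairwise_map.mpr hdesc
  rw [hsig]
  have hftne : ft ≠ [] := by
    intro hEq
    obtain ⟨c0, hc0⟩ := List.exists_mem_of_ne_nil _ hne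
    have h0 : (c0, (xs.count c0 : Int)) ∈ (PySem.Dict.counter xs).items := by
      rw [hitems]; exact List.mem_map.mpr ⟨c0, (PySem.Set.mem_ofList xs c0).mpr hc0, rfl⟩
    have hmm := hpf.symm.mem_iff.mp h0
    rw [hEq] at hmm
    simp at hmm
  have hhead : xs.head?.getD '2' ∈ xs := by
    rcases hq : xs with _|⟨x0, t⟩
    · exact absurd hq hne
    · simp
  clear_value ft
  clear hftdef
  rcases ft with _|⟨⟨a,v1⟩, ft'⟩
  · exact absurd rfl hftne
  have hmem1 := hmem (a,v1) (by simp)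
  have h1le : (1:Int) ≤ v1 := hone v1 (by simp)
  have hv1c : v1 = (xs.count a : Int) := hmem1.2
  have hv1le5 : v1 ≤ (5:Int) := by
    rw [hv1c]; exact_mod_cast hle5 a hmem1.1
  rcases ft' with _|⟨⟨b,v2⟩, ft''⟩
  · -- exactly one distinct card
    have hitems1 : (PySem.Dict.counter xs).items = [(a, v1)] := (List.singleton_perm.mp hpf).symm
    have hall : ∀ c ∈ xs, c = a := by
      intro c hc
      have h0 : (c, (xs.count c : Int)) ∈ (PySem.Dict.counter xs).items := by
        rw [hitems]; exact List.mem_map.mpr ⟨c, (PySem.Set.mem_ofList xs c).mpr hc, rfl⟩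
      rw [hitems1] at h0
      simp at h0
      exact h0.1
    by_cases h23 : v1 = 2 ∨ v1 = 3
    · exfalso
      have hca : xs.count a = v1.toNat := by omega
      rcases hsh with (h3 | h1) | hR
      · obtain ⟨c, hc, h3⟩ := h3
        rw [hall c hc, hca] at h3; omega
      · have := h1 a hmem1.1
        rw [hca] at this; omega
      · obtain ⟨c, hc, hcne⟩ := hR
        exact hcne ((hall c hc).trans (hall _ hhead).symm)
    · have hv : v1 = 1 ∨ v1 = 4 ∨ v1 = 5 := by omega
      rcases hv with rfl | rfl | rfl <;>
        norm_num [PySem.List.pyGet?, PySem.List.pyIdx?, pv_len_succ_nonneg, Int.natCast_nonneg]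
  · -- at least two distinct cards
    have h2le : (1:Int) ≤ v2 := hone v2 (by simp)
    have hv21 : v2 ≤ v1 := by
      rcases List.pairwise_cons.mp hdesc with ⟨hh, _⟩
      exact hh (b,v2) (by simp)
    have hv : v1 = 1 ∨ v1 = 2 ∨ v1 = 3 ∨ v1 = 4 ∨ v1 = 5 := by omega
    rcases hv with rfl | rfl | rfl | rfl | rfl
    · norm_num [PySem.List.pyGet?, PySem.List.pyIdx?, pv_len_succ_nonneg, Int.natCast_nonneg]
    · by_cases h2 : v2 = 2 <;>
        norm_num [PySem.List.pyGet?, PySem.List.pyIdx?, pv_len_succ_nonneg, Int.natCast_nonneg, h2]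
    · by_cases h2 : v2 = 2 <;>
        norm_num [PySem.List.pyGet?, PySem.List.pyIdx?, pv_len_succ_nonneg, Int.natCast_nonneg, h2]
    · norm_num [PySem.List.pyGet?, PySem.List.pyIdx?, pv_len_succ_nonneg, Int.natCast_nonneg]
    · norm_num [PySem.List.pyGet?, PySem.List.pyIdx?, pv_len_succ_nonneg, Int.natCast_nonneg]

-- ===== VERDICT (by name: the statement is the Claim_ definition above) =====
theorem get_sorted_ranking_spec : Claim_equal_get_sorted_ranking := by
  intro hands bids joker _ hpre
  unfold Spec_get_sorted_ranking
  simp only [get_sorted_ranking, get_sorted_ranking_alt, pv_cards_list, pv_cards_list_b]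
  rw [PySem.List.foldl_append_singleton_eq_map]
  simp only [List.nil_append]
  congr 1
  apply List.map_congr_left
  intro p hp
  have hall := List.all_eq_true.mp hpre p hp
  simp only [Bool.and_eq_true] at hall
  cases joker
  · simp only [Bool.false_eq_true, if_false]
    have hcond := hall.2
    simp at hcond
    have hne : p.1.toList ≠ [] := fun h => hcond.1.1 (String.toList_eq_nil_iff.mp h)
    rw [pv_type_eq_p p.1 hne hcond.1.2 hcond.2]
  · simp only [if_true]
    have hcond := hall.2
    simp only [if_true, beq_iff_eq] at hcond
    rw [pv_type_eq_j p.1 hcond]
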